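-- pv_equiv track=rewrite | github.com/Fondamenti18/fondamenti-di-programmazione | students/1801980/homework01/program03.py | chiave
-- ===== SOURCE A (Python) =====
-- def chiave(parola):
--     disordinata=[]
--     for i in range(0,len(parola)):
--         if parola[i]>='a' and parola[i]<='z':
--             disordinata.append(parola[i])
--     copia=[]
--     copia=disordinata[:]
--     for i in copia:
--         if disordinata.count(i)>1:
--             disordinata.remove(i)
--     ordinata=[]
--     ordinata=sorted(disordinata)
--     return(ordinata,disordinata)
-- ===== SOURCE B (Python) =====
-- def chiave(parola):
--     seen = set()
--     rev = []
--     for c in reversed(parola):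
--         if 'a' <= c <= 'z' and c not in seen:
--             seen.add(c)
--             rev.append(c)
--     disordinata = rev[::-1]
--     return (sorted(disordinata), disordinata)
-- ===== Notes on version B (the rewrite author's own statement) =====
-- stated objective: faster
-- what changed: Replaces A's quadratic count/remove dedup pass (plus a forward filter loop) with a single reversed scan keeping a seen-set, building the deduplicated list back-to-front and reversing it once.
import Mathlib
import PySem

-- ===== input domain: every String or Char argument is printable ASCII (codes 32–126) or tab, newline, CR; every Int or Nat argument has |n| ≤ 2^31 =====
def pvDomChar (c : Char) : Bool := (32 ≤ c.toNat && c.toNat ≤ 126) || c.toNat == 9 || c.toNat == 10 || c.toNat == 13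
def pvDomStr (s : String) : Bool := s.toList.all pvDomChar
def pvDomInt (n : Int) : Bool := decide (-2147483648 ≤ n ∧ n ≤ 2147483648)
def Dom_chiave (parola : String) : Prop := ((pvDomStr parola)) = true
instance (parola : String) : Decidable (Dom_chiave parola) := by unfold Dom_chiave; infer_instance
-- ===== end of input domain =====

-- B replaces A's quadratic count/remove dedup pass with a single reversed scan over the
-- string keeping a seen-set, building the deduplicated list back-to-front (faster).

-- ===== PORT A =====
-- Python indexes a str to 1-char strings; PySem models s[i] as a Char, so the port compares
-- the Char ('a' ≤ c, exact for 1-char strings) and stores it as the 1-char String `String.ofList [c]`.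
def chiave (parola : String) : List String × List String :=
  let disordinata : List String :=
    (PySem.List.pyRange 0 (PySem.Str.len parola) 1).foldl
      (fun acc i =>
        match PySem.Str.pyGet? parola i with
        | some c => if 'a' ≤ c ∧ c ≤ 'z' then acc ++ [String.ofList [c]] else acc
        | none => acc) []
  let copia := PySem.List.slice disordinata none none
  let disordinata2 := copia.foldl
    (fun d x => if 1 < PySem.List.count d x then (PySem.List.remove? d x).getD d else d)
    disordinata
  let ordinata := PySem.List.sorted disordinata2 (fun x => x) false
  (ordinata, disordinata2)

-- ===== PORT B =====
-- `reversed(parola)` → parola.toList.reverse; `rev[::-1]` → .reverse (PySem.List.slice?_none_none_neg_one).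
def chiave_alt (parola : String) : List String × List String :=
  let st := parola.toList.reverse.foldl
    (fun (s : PySem.Set String × List String) c =>
      if ('a' ≤ c ∧ c ≤ 'z') ∧ String.ofList [c] ∉ s.1 then
        (PySem.Set.add s.1 (String.ofList [c]), s.2 ++ [String.ofList [c]])
      else s)
    (PySem.Set.empty, [])
  let disordinata := st.2.reverse
  (PySem.List.sorted disordinata (fun x => x) false, disordinata)

-- ===== PRECONDITION & SPEC =====
def Spec_chiave (parola : String) (out : List String × List String) : Prop := out = chiave_alt parola
instance (parola : String) (out : List String × List String) : Decidable (Spec_chiave parola out) := by unfold Spec_chiave; infer_instance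

-- ===== CLAIM (what is proved, stated in full; the proofs are below) =====
def Claim_equal_chiave : Prop := ∀ (parola : String), Dom_chiave parola → Spec_chiave parola (chiave parola)

-- ===== LEMMAS AND PROOFS =====

-- the lowercase letters of the input, as 1-char strings, in order
def pvLow (l : List Char) : List String :=
  (l.filter (fun c => decide ('a' ≤ c ∧ c ≤ 'z'))).map (fun c => String.ofList [c])

-- A's first loop is the lowercase filter
theorem pv_loop1 (l : List Char) (acc : List String) :
    (PySem.List.pyRange 0 (l.length : Int) 1).foldl
      (fun acc i =>
        match PySem.List.pyGet? l i with
        | some c => if 'a' ≤ c ∧ c ≤ 'z' then acc ++ [String.ofList [c]] else acc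
        | none => acc) acc
    = acc ++ pvLow l := by
  induction l using List.reverseRecOn generalizing acc with
  | nil => simp [pvLow, PySem.List.pyRange_one_eq_nil]
  | append_singleton t c ih =>
      have hlen : ((t ++ [c]).length : Int) = (t.length : Int) + 1 := by simp
      rw [hlen, PySem.List.pyRange_one_succ_right (by positivity), List.foldl_append]
      have hcong : (PySem.List.pyRange 0 (t.length : Int) 1).foldl
          (fun acc i =>
            match PySem.List.pyGet? (t ++ [c]) i with
            | some x => if 'a' ≤ x ∧ x ≤ 'z' then acc ++ [String.ofList [x]] else acc
            | none => acc) acc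
          = (PySem.List.pyRange 0 (t.length : Int) 1).foldl
          (fun acc i =>
            match PySem.List.pyGet? t i with
            | some x => if 'a' ≤ x ∧ x ≤ 'z' then acc ++ [String.ofList [x]] else acc
            | none => acc) acc := by
        apply PySem.List.foldl_congr_mem
        intro a i hi
        rw [PySem.List.mem_pyRange_one] at hi
        have h0 : 0 ≤ i := hi.1
        have h1 : i.toNat < t.length := by omega
        rw [PySem.List.pyGet?_of_nonneg _ h0, PySem.List.pyGet?_of_nonneg _ h0,
          List.getElem?_append_left h1]
      rw [hcong, ih]
      have hget : PySem.List.pyGet? (t ++ [c]) ((t.length : Int)) = some c := by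
        exact PySem.List.pyGet?_append_length (pre := t) (y := c) (ys := [])
      simp only [List.foldl_cons, List.foldl_nil, hget, pvLow, List.filter_append, List.map_append]
      by_cases h : 'a' ≤ c ∧ c ≤ 'z' <;> simp [h]

-- A's second loop is Mathlib's dedup (keep LAST occurrences)
theorem pv_loop2 (t : List String) : ∀ (s : List String), s.Nodup → (∀ x ∈ s, x ∉ t) →
    t.foldl
      (fun d x => if 1 < PySem.List.count d x then (PySem.List.remove? d x).getD d else d)
      (s ++ t) = s ++ t.dedup := by
  induction t with
  | nil => intro s _ _; simp
  | cons x r ih =>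
      intro s hnd hdisj
      have hxs : x ∉ s := fun hx => hdisj x hx (List.mem_cons_self)
      have hcnt : PySem.List.count (s ++ x :: r) x = 1 + List.count x r := by
        rw [PySem.List.count_eq]
        simp [List.count_append, List.count_eq_zero_of_not_mem hxs, List.count_cons_self,
          Nat.add_comm]
      simp only [List.foldl_cons]
      by_cases hmem : x ∈ r
      · have h1 : 1 < PySem.List.count (s ++ x :: r) x := by
          rw [hcnt]; have := List.count_pos_iff.mpr hmem; omega
        rw [if_pos h1]
        have hrm : PySem.List.remove? (s ++ x :: r) x = some ((s ++ x :: r).erase x) :=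
          PySem.List.remove?_eq_some_erase _ x (by simp)
        rw [hrm]
        have herase : (s ++ x :: r).erase x = s ++ r := by
          rw [List.erase_append_right _ hxs, List.erase_cons_head]
        simp only [Option.getD_some, herase]
        rw [ih s hnd (fun y hy => fun hyr => hdisj y hy (List.mem_cons_of_mem _ hyr)),
          List.dedup_cons_of_mem hmem]
      · have h1 : ¬ 1 < PySem.List.count (s ++ x :: r) x := by
          rw [hcnt, List.count_eq_zero_of_not_mem hmem]; omega
        rw [if_neg h1]
        have hstep : s ++ x :: r = (s ++ [x]) ++ r := by simp
        rw [hstep, ih (s ++ [x])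
          (by simp [List.nodup_append, hnd]; intro a ha hax; exact hxs (hax ▸ ha))
          (by intro y hy
              rcases List.mem_append.mp hy with h | h
              · exact fun hyr => hdisj y h (List.mem_cons_of_mem _ hyr)
              · simp at h; subst h; exact hmem),
          List.dedup_cons_of_notMem hmem]
        simp

-- first-occurrence dedup avoiding a seen list (proof-side model of B's loop)
def pvF : List String → List String → List String
  | [], _ => []
  | x :: xs, s => if x ∈ s then pvF xs s else x :: pvF xs (PySem.Set.add s x)

theorem pvF_congr (l : List String) : ∀ s s', (∀ x : String, x ∈ s ↔ x ∈ s') →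
    pvF l s = pvF l s' := by
  induction l with
  | nil => intro s s' _; rfl
  | cons x xs ih =>
      intro s s' h
      simp only [pvF]
      by_cases hx : x ∈ s
      · rw [if_pos hx, if_pos ((h x).mp hx)]; exact ih s s' h
      · rw [if_neg hx, if_neg (fun hx' => hx ((h x).mpr hx'))]
        refine congrArg _ (ih _ _ ?_)
        intro y
        simp only [PySem.Set.mem_add, h y]

theorem pvF_append (a b : List String) : ∀ s, pvF (a ++ b) s = pvF a s ++ pvF b (s ++ a) := by
  induction a with
  | nil => intro s; simp [pvF]
  | cons x xs ih =>
      intro s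
      simp only [List.cons_append, pvF]
      by_cases hx : x ∈ s
      · rw [if_pos hx, if_pos hx, ih]
        refine congrArg _ (pvF_congr b _ _ ?_)
        intro y
        simp only [List.mem_append, List.mem_cons]
        constructor
        · tauto
        · rintro (h | h | h)
          · exact Or.inl h
          · exact Or.inl (h ▸ hx)
          · exact Or.inr h
      · rw [if_neg hx, if_neg hx, ih]
        simp only [List.cons_append]
        refine congrArg _ (congrArg _ (pvF_congr b _ _ ?_))
        intro y
        simp only [List.mem_append, PySem.Set.mem_add, List.mem_cons]
        tauto

theorem pvF_rev_dedup (l : List String) : (pvF l.reverse []).reverse = l.dedup := by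
  induction l with
  | nil => rfl
  | cons x t ih =>
      rw [List.reverse_cons, pvF_append, List.reverse_append]
      have hF1 : ∀ s : List String, pvF [x] s = if x ∈ s then [] else [x] := by
        intro s; by_cases h : x ∈ s <;> simp [pvF, h]
      rw [hF1]
      by_cases hx : x ∈ t
      · rw [if_pos (by simpa using hx), List.dedup_cons_of_mem hx]
        simpa using ih
      · rw [if_neg (by simpa using hx), List.dedup_cons_of_notMem hx]
        simpa using ih

-- B's loop computes pvF over the lowercase filter of the traversed characters
theorem pv_loopB (l : List Char) : ∀ (s : PySem.Set String) (rev : List String),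
    l.foldl
      (fun (s : PySem.Set String × List String) c =>
        if ('a' ≤ c ∧ c ≤ 'z') ∧ String.ofList [c] ∉ s.1 then
          (PySem.Set.add s.1 (String.ofList [c]), s.2 ++ [String.ofList [c]])
        else s)
      (s, rev)
    = ((pvLow l).foldl PySem.Set.add s, rev ++ pvF (pvLow l) s) := by
  induction l with
  | nil => intro s rev; simp [pvLow, pvF]
  | cons c t ih =>
      intro s rev
      by_cases hc : 'a' ≤ c ∧ c ≤ 'z'
      · have hlow : pvLow (c :: t) = String.ofList [c] :: pvLow t := by
          simp [pvLow, hc]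
        by_cases hmem : String.ofList [c] ∈ s
        · rw [List.foldl_cons, if_neg (by simp [hmem]), ih, hlow]
          simp [pvF, hmem]
        · rw [List.foldl_cons, if_pos ⟨hc, hmem⟩, ih, hlow]
          simp [pvF, hmem]
      · have hlow : pvLow (c :: t) = pvLow t := by
          simp [pvLow, hc]
        rw [List.foldl_cons, if_neg (by simp [hc]), ih, hlow]

-- both disordinata lists are (pvLow parola.toList).dedup
theorem pv_A_snd (parola : String) :
    chiave parola = (PySem.List.sorted (pvLow parola.toList).dedup (fun x => x) false,
      (pvLow parola.toList).dedup) := by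
  simp only [chiave]
  have h1 : (PySem.List.pyRange 0 (PySem.Str.len parola) 1).foldl
      (fun acc i =>
        match PySem.Str.pyGet? parola i with
        | some c => if 'a' ≤ c ∧ c ≤ 'z' then acc ++ [String.ofList [c]] else acc
        | none => acc) []
      = pvLow parola.toList := by
    have := pv_loop1 parola.toList []
    simpa [PySem.Str.len_eq, PySem.Chars.len_eq] using this
  have h2 := pv_loop2 (pvLow parola.toList) [] List.nodup_nil (by simp)
  simp only [List.nil_append] at h2
  simp only [h1, PySem.List.slice_none_none, h2]

theorem pv_B_snd (parola : String) :
    chiave_alt parola = (PySem.List.sorted (pvLow parola.toList).dedup (fun x => x) false,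
      (pvLow parola.toList).dedup) := by
  simp only [chiave_alt]
  rw [pv_loopB]
  have hM : pvLow parola.toList.reverse = (pvLow parola.toList).reverse := by
    simp [pvLow, List.filter_reverse, List.map_reverse]
  have hE : PySem.Set.empty = ([] : List String) := rfl
  simp only [hM, hE, List.nil_append]
  rw [pvF_rev_dedup]

-- ===== VERDICT (by name: the statement is the Claim_ definition above) =====
theorem chiave_spec : Claim_equal_chiave := by
  intro parola _
  unfold Spec_chiave
  rw [pv_A_snd, pv_B_snd]
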